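-- pv_equiv track=rewrite | github.com/azuka31/Wordle-Breaker | wordle_breaker.py | recomend
-- ===== SOURCE A (Python) =====
-- def recomend(arr, chars):
--     def prioritize(word):
--         if char in word:
--             return True
--         else:
--             return False
--     for char in chars:
--         arr = list(filter(prioritize, arr))
--     return arr
-- ===== SOURCE B (Python) =====
-- def recomend(arr, chars):
--     out = []
--     for w in arr:
--         ok = True
--         for c in chars:
--             if c not in w:
--                 ok = False
--                 break
--         if ok:
--             out.append(w)
--     return out
-- ===== Notes on version B (the rewrite author's own statement) =====
-- stated objective: simpler
-- what changed: Reverses the loop nesting: instead of A's repeated full-list filter passes (one per char, via a closure over the loop variable), B makes a single pass over the words and checks all chars per word with an early-exit inner loop, building the result directly.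
import Mathlib
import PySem

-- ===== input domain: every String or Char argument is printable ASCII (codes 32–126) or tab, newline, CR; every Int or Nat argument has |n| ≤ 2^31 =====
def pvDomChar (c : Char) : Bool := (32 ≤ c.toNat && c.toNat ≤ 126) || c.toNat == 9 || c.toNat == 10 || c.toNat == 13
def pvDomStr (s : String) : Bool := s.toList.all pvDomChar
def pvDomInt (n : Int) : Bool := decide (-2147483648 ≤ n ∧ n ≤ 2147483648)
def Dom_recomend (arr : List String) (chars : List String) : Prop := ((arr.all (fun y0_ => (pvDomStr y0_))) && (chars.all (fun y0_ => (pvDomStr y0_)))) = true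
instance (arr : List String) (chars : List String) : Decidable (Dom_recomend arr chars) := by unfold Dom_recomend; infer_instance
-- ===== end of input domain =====

-- B reverses A's loop nesting: one pass over the words with an early-exit per-word char check,
-- instead of A's repeated filter passes (one per char); same result, no intermediate lists.


-- ===== PORT A =====
-- A: one full filter pass over arr per element of chars ('char in word' = substring test)
def recomend (arr : List String) (chars : List String) : List String :=
  chars.foldl (fun acc char => acc.filter (fun word => PySem.Str.isIn char word)) arr

-- ===== PORT B =====
-- B helper: the inner loop with break — true iff every char is a substring of w
def hasAllChars (w : String) : List String → Bool
  | [] => true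
  | c :: rest => if PySem.Str.isIn c w then hasAllChars w rest else false

-- B: single recursive pass over the words, keeping w iff hasAllChars
def recomend_alt (arr : List String) (chars : List String) : List String :=
  match arr with
  | [] => []
  | w :: rest =>
      if hasAllChars w chars then w :: recomend_alt rest chars
      else recomend_alt rest chars

-- ===== PRECONDITION & SPEC =====
def Spec_recomend (arr : List String) (chars : List String) (out : List String) : Prop := out = recomend_alt arr chars
instance (arr : List String) (chars : List String) (out : List String) : Decidable (Spec_recomend arr chars out) := by unfold Spec_recomend; infer_instance

-- ===== CLAIM (what is proved, stated in full; the proofs are below) =====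
def Claim_equal_recomend : Prop := ∀ (arr : List String) (chars : List String), Dom_recomend arr chars → Spec_recomend arr chars (recomend arr chars)

-- ===== LEMMAS AND PROOFS =====
lemma hasAllChars_eq_all (w : String) (chars : List String) :
    hasAllChars w chars = chars.all (fun c => PySem.Str.isIn c w) := by
  induction chars with
  | nil => rfl
  | cons c rest ih =>
    simp only [hasAllChars, List.all_cons, ih]
    cases h : PySem.Str.isIn c w <;> simp_all


lemma recomend_alt_eq_filter (arr chars : List String) :
    recomend_alt arr chars = arr.filter (fun w => hasAllChars w chars) := by
  induction arr with
  | nil => rfl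
  | cons w rest ih =>
    simp only [recomend_alt, List.filter_cons, ih]

lemma foldl_filter_eq (chars : List String) (acc : List String) :
    chars.foldl (fun acc char => acc.filter (fun word => PySem.Str.isIn char word)) acc
      = acc.filter (fun w => chars.all (fun c => PySem.Str.isIn c w)) := by
  induction chars generalizing acc with
  | nil => simp
  | cons c rest ih =>
    simp only [List.foldl_cons, ih, List.filter_filter, List.all_cons]
    exact List.filter_congr (fun w _ => by rw [Bool.and_comm])

-- ===== VERDICT (by name: the statement is the Claim_ definition above) =====
theorem recomend_spec : Claim_equal_recomend := by
  intro arr chars _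
  unfold Spec_recomend recomend
  rw [recomend_alt_eq_filter, foldl_filter_eq]
  exact List.filter_congr (fun w _ => (hasAllChars_eq_all w chars).symm)
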